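-- pv_equiv track=rewrite | github.com/Lio-RP/MOZIiIB-laps | work/2023-2024/MOZIiIB/laboratory/lab02/encryption algorithms/route_encryption.py | groupingtextby_m
-- ===== SOURCE A (Python) =====
-- punctuation=[" ",";",",",":","-","!","?", "\"", "."]
--
-- def groupingtextby_m(text, key):
--     m = len(key)
--     text = text.lower()
--     for punc in punctuation:
--         text = text.replace(punc, '')
--
--     text=[text[i:i+m] for i in range(0, len(text), m)]
--
--     if len(text[-1]) < m:
--         last_word = text[-1]
--         for i in range(0, m - len(last_word)):
--             last_word += 'а'
--
--         text[-1] = last_word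
--
--     return text
-- ===== SOURCE B (Python) =====
-- punctuation_set = set(' ;,:-!?".')
--
-- def groupingtextby_m(text, key):
--     m = len(key)
--     s = ''.join(c for c in text.lower() if c not in punctuation_set)
--     groups = []
--     while s:
--         chunk, s = s[:m], s[m:]
--         groups.append(chunk.ljust(m, 'а'))
--     return groups
-- ===== Notes on version B (the rewrite author's own statement) =====
-- stated objective: alternative
-- what changed: Punctuation removal becomes one per-character filter pass with a set instead of nine sequential full-string replace scans, and chunking becomes a streaming slice-and-ljust loop instead of an index comprehension followed by a post-hoc fix-up of the last chunk.
import Mathlib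
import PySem

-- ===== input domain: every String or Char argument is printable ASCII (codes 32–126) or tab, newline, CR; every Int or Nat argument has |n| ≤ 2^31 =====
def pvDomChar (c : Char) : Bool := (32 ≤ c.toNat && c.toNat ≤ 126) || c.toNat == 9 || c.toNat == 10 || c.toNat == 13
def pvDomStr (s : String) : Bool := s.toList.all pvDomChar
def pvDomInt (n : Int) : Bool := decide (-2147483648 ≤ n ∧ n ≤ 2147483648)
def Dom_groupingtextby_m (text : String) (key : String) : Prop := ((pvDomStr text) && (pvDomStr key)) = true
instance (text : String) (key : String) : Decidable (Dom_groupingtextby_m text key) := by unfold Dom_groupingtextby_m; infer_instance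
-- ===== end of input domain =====

-- B replaces the nine sequential .replace scans by one per-character filter pass over the
-- lowered text, and replaces the index comprehension + fix-up of the last chunk by a
-- streaming slice-and-pad loop (alternative decomposition; not claimed faster).

-- ===== PORT A =====
def pvPunct : List (List Char) := [[' '], [';'], [','], [':'], ['-'], ['!'], ['?'], ['"'], ['.']]

def groupingtextby_m (text : String) (key : String) : List String :=
  let m : Int := PySem.Str.len key
  let t0 := PySem.Chars.lower text.toList
  let t1 := pvPunct.foldl (fun acc p => PySem.Chars.replace acc p []) t0
  let chunks := (PySem.List.pyRange 0 (t1.length : Int) m).map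
      (fun i => PySem.List.slice t1 (some i) (some (i + m)))
  match PySem.List.pyGet? chunks (-1) with
  | none => []  -- Python raises IndexError here (empty cleaned text); excluded by Pre_
  | some last =>
    if (last.length : Int) < m then
      let lw := (PySem.List.pyRange 0 (m - (last.length : Int)) 1).foldl
          (fun w _ => w ++ ['а']) last
      (chunks.dropLast ++ [lw]).map String.ofList
    else
      chunks.map String.ofList

-- ===== PORT B =====
def pvPunctChars : List Char := [' ', ';', ',', ':', '-', '!', '?', '"', '.']

-- the while-loop of Source B: peel off s[:m], pad it with ljust, recurse on s[m:]; the fuel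
-- (initially the string length) only makes the recursion structural — it is never exhausted
-- when m ≥ 1, and Python B's loop does not terminate when m = 0 (excluded by Pre_)
def pvChunkPad (m : Nat) : Nat → List Char → List String
  | _, [] => []
  | 0, _ :: _ => []
  | fuel + 1, c :: t =>
      String.ofList (((c :: t).take m) ++ List.replicate (m - (c :: t).length) 'а')
        :: pvChunkPad m fuel ((c :: t).drop m)

def groupingtextby_m_alt (text : String) (key : String) : List String :=
  let m : Int := PySem.Str.len key
  let s := (PySem.Chars.lower text.toList).filter (fun c => !pvPunctChars.contains c)
  pvChunkPad m.toNat s.length s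

-- ===== PRECONDITION & SPEC =====
-- the lowered text with punctuation characters removed (used only to state Pre_/Raises_)
def pvCleaned (text : String) : List Char :=
  (PySem.Chars.lower text.toList).filter
    (fun c => !([' ', ';', ',', ':', '-', '!', '?', '"', '.'] : List Char).contains c)

-- A raises ValueError when key = "" (range step 0) and IndexError when the cleaned text is
-- empty (indexing [-1] of an empty list); Pre_ excludes exactly those inputs.
def Pre_groupingtextby_m (text : String) (key : String) : Prop :=
  key ≠ "" ∧ pvCleaned text ≠ []
instance (text : String) (key : String) : Decidable (Pre_groupingtextby_m text key) := by
  unfold Pre_groupingtextby_m; infer_instance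

def pvWitness_groupingtextby_m : String × String := ("ab, cd", "xyz")

def Spec_groupingtextby_m (text : String) (key : String) (out : List String) : Prop :=
  out = groupingtextby_m_alt text key
instance (text : String) (key : String) (out : List String) : Decidable (Spec_groupingtextby_m text key out) := by
  unfold Spec_groupingtextby_m; infer_instance

-- ===== CLAIM (what is proved, stated in full; the proofs are below) =====
def Claim_equal_groupingtextby_m : Prop := ∀ (text : String) (key : String),
  Dom_groupingtextby_m text key → Pre_groupingtextby_m text key →
  Spec_groupingtextby_m text key (groupingtextby_m text key)

-- ===== LEMMAS AND PROOFS =====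

-- removing one single-character pattern with replace is a filter
lemma pvReplaceGo_spec (p : Char) (fuel : Nat) : ∀ (l acc : List Char), l.length ≤ fuel →
    PySem.Chars.replace.go [p] [] fuel l acc
      = acc.reverse ++ l.filter (fun c => !(c == p)) := by
  induction fuel with
  | zero =>
    intro l acc h
    have : l = [] := List.eq_nil_of_length_eq_zero (by omega)
    subst this
    rw [PySem.Chars.replace.go.eq_def]
    simp
  | succ n ih =>
    intro l acc h
    cases l with
    | nil => rw [PySem.Chars.replace.go.eq_def]; simp
    | cons c t =>
      rw [PySem.Chars.replace.go.eq_def]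
      simp only [List.isPrefixOf, Bool.and_true]
      by_cases hpc : p = c
      · subst hpc
        simp only [BEq.rfl, if_pos]
        rw [ih _ _ (by simpa using Nat.le_of_succ_le_succ h)]
        simp
      · have : (p == c) = false := by simp [hpc]
        rw [this]
        simp only [Bool.false_eq_true, if_false]
        rw [ih t (c :: acc) (by simpa using Nat.le_of_succ_le_succ h)]
        simp [Ne.symm hpc]

lemma pvReplace_single (p : Char) (s : List Char) :
    PySem.Chars.replace s [p] [] = s.filter (fun c => !(c == p)) := by
  rw [PySem.Chars.replace]
  simp only [List.isEmpty_cons, if_false, Bool.false_eq_true]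
  rw [pvReplaceGo_spec p s.length s [] le_rfl]
  simp

-- the nine sequential replaces of A are one filter
lemma pvCleaned_eq (t : List Char) :
    pvPunct.foldl (fun acc p => PySem.Chars.replace acc p []) t
      = t.filter (fun c => !pvPunctChars.contains c) := by
  simp only [pvPunct, List.foldl_cons, List.foldl_nil, pvReplace_single, List.filter_filter]
  apply List.filter_congr
  intro c _
  rw [Bool.eq_iff_iff]
  simp [pvPunctChars]
  tauto

-- the padding loop of A appends a replicate
lemma pvPadFold (l : List Int) (acc : List Char) :
    l.foldl (fun w _ => w ++ ['а']) acc = acc ++ List.replicate l.length 'а' := by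
  induction l generalizing acc with
  | nil => simp
  | cons x xs ih => simp [List.foldl, ih, List.replicate_succ]

lemma pvPyRange_pos_nil (a b m : Int) (hm : 0 < m) (h : b ≤ a) :
    PySem.List.pyRange a b m = [] := by
  rw [PySem.List.pyRange_of_pos a b hm]
  simp [show ¬ (a < b) by omega]

lemma pvPyRange_pos_cons (a b m : Int) (hm : 0 < m) (h : a < b) :
    PySem.List.pyRange a b m = a :: PySem.List.pyRange (a + m) b m := by
  rw [PySem.List.pyRange_of_pos a b hm, PySem.List.pyRange_of_pos _ b hm]
  have key : b - a + m - 1 = (b - a - 1) + 1 * m := by ring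
  have h1 : (b - a + m - 1) / m = (b - a - 1) / m + 1 := by
    rw [key, Int.add_mul_ediv_right _ _ (show m ≠ 0 by omega)]
  by_cases h2 : a + m < b
  · have h3 : b - (a + m) + m - 1 = b - a - 1 := by ring
    rw [if_pos h, if_pos h2, h1, h3]
    have h4 : (0:Int) ≤ (b - a - 1) / m := Int.ediv_nonneg (by omega) (by omega)
    have h5 : ((b - a - 1) / m + 1).toNat = ((b - a - 1) / m).toNat + 1 := by omega
    rw [h5, List.range_succ_eq_map]
    simp only [List.map_cons, List.map_map]
    congr 1
    · ring
    · apply List.map_congr_left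
      intro k _
      simp [Function.comp, Nat.succ_eq_add_one]
      ring
  · rw [if_pos h, if_neg h2]
    have h6 : (b - a - 1) / m = 0 := Int.ediv_eq_zero_of_lt (by omega) (by omega)
    rw [h1, h6]
    simp

lemma pvPyRange_shift (a b c m : Int) (hm : 0 < m) :
    PySem.List.pyRange (a + c) (b + c) m = (PySem.List.pyRange a b m).map (fun x => x + c) := by
  rw [PySem.List.pyRange_of_pos _ _ hm, PySem.List.pyRange_of_pos a b hm]
  have : b + c - (a + c) = b - a := by ring
  rw [this]
  have : a + c < b + c ↔ a < b := by omega
  simp only [this, List.map_map]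
  apply List.map_congr_left
  intro k _
  simp
  ring

lemma pvGetNegOne {α : Type} (xs : List α) (h : xs ≠ []) :
    PySem.List.pyGet? xs (-1) = xs[xs.length - 1]? := by
  have hn : 1 ≤ xs.length := List.length_pos_iff.mpr h
  simp [PySem.List.pyGet?, PySem.List.pyIdx?, show -(xs.length:Int) ≤ -1 by omega]

-- A's chunking expression (its body after the cleaned text is fixed), named for the induction
def pvAexpr (m : Int) (s : List Char) : List String :=
  let chunks := (PySem.List.pyRange 0 (s.length : Int) m).map
      (fun i => PySem.List.slice s (some i) (some (i + m)))
  match PySem.List.pyGet? chunks (-1) with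
  | none => []
  | some last =>
    if (last.length : Int) < m then
      let lw := (PySem.List.pyRange 0 (m - (last.length : Int)) 1).foldl
          (fun w _ => w ++ ['а']) last
      (chunks.dropLast ++ [lw]).map String.ofList
    else
      chunks.map String.ofList

lemma pvSliceHead (s : List Char) (m : Nat) :
    PySem.List.slice s (some (0:Int)) (some ((m:Nat):Int)) = s.take m := by
  have := PySem.List.slice_natCast_add s 0 m
  simpa using this

-- the chunk comprehension + last-chunk fix of A equals B's streaming recursion
lemma pvMain (m : Nat) (hm : 1 ≤ m) (fuel : Nat) : ∀ (s : List Char), s ≠ [] → s.length ≤ fuel →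
    pvAexpr (m : Int) s = pvChunkPad m fuel s := by
  induction fuel with
  | zero => intro s hs hf; exact absurd (List.eq_nil_of_length_eq_zero (by omega)) hs
  | succ n ih =>
    intro s hs hf
    obtain ⟨c, t, rfl⟩ := List.exists_cons_of_ne_nil hs
    set s := c :: t with hsdef
    have hlen : 1 ≤ s.length := by simp [hsdef]
    have hm' : (0:Int) < (m:Int) := by exact_mod_cast hm
    rw [pvAexpr]
    rw [pvPyRange_pos_cons 0 (s.length:Int) (m:Int) hm' (by exact_mod_cast hlen)]
    simp only [List.map_cons, zero_add]
    rw [pvSliceHead]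
    by_cases hbig : m < s.length
    · -- more than one chunk: peel the first and recurse
      have hshift : PySem.List.pyRange (m:Int) (s.length:Int) (m:Int)
          = (PySem.List.pyRange 0 ((s.drop m).length : Int) (m:Int)).map (fun x => x + (m:Int)) := by
        have h1 : ((s.drop m).length : Int) = (s.length:Int) - (m:Int) := by
          simp [List.length_drop]; omega
        rw [h1]
        have := pvPyRange_shift 0 ((s.length:Int) - (m:Int)) (m:Int) (m:Int) hm'
        simpa using this
      rw [hshift, List.map_map]
      have hmapeq : (PySem.List.pyRange 0 ((s.drop m).length : Int) (m:Int)).map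
            ((fun i => PySem.List.slice s (some i) (some (i + (m:Int)))) ∘ (fun x => x + (m:Int)))
          = (PySem.List.pyRange 0 ((s.drop m).length : Int) (m:Int)).map
            (fun i => PySem.List.slice (s.drop m) (some i) (some (i + (m:Int)))) := by
        apply List.map_congr_left
        intro i hi
        have h0i : 0 ≤ i := ((PySem.List.mem_pyRange_iff_of_pos hm' i).mp hi).1
        obtain ⟨j, rfl⟩ := Int.eq_ofNat_of_zero_le h0i
        simp only [Function.comp]
        rw [PySem.List.slice_natCast_add (s.drop m) j m]
        have e1 : (j:Int) + (m:Int) + (m:Int) = ((j + m : Nat) : Int) + ((m:Nat):Int) := by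
          push_cast; ring
        rw [e1]
        have e0 : (j:Int) + (m:Int) = ((j + m : Nat) : Int) := by push_cast; ring
        rw [e0, PySem.List.slice_natCast_add s (j + m) m, List.drop_drop]
        congr 2
        omega
      rw [hmapeq]
      have hs' : s.drop m ≠ [] := by
        intro hnil
        have := congrArg List.length hnil
        simp [List.length_drop] at this
        omega
      have htail := ih (s.drop m) hs' (by simp [List.length_drop, hsdef] at hf ⊢; omega)
      rw [pvAexpr] at htail
      set chunks' := (PySem.List.pyRange 0 ((s.drop m).length : Int) (m:Int)).map
          (fun i => PySem.List.slice (s.drop m) (some i) (some (i + (m:Int)))) with hc'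
      have hc'ne : chunks' ≠ [] := by
        rw [hc', pvPyRange_pos_cons 0 ((s.drop m).length:Int) (m:Int) hm'
          (by exact_mod_cast List.length_pos_iff.mpr hs')]
        simp
      have hgl : PySem.List.pyGet? (s.take m :: chunks') (-1) = PySem.List.pyGet? chunks' (-1) := by
        rw [pvGetNegOne _ (by simp), pvGetNegOne _ hc'ne]
        have h1 : 1 ≤ chunks'.length := List.length_pos_iff.mpr hc'ne
        have : (s.take m :: chunks').length - 1 = (chunks'.length - 1) + 1 := by simp; omega
        rw [this]
        simp
      rw [hgl]
      obtain ⟨last, hlast⟩ : ∃ v, PySem.List.pyGet? chunks' (-1) = some v := by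
        rw [pvGetNegOne _ hc'ne]
        have h1 : 1 ≤ chunks'.length := List.length_pos_iff.mpr hc'ne
        exact ⟨_, List.getElem?_eq_getElem (by omega)⟩
      rw [hlast]
      rw [hlast] at htail
      dsimp only at htail ⊢
      have hrhs : pvChunkPad m (n+1) s
          = String.ofList (s.take m) :: pvChunkPad m n (s.drop m) := by
        have hb2 : m < t.length + 1 := by rw [hsdef] at hbig; simpa using hbig
        have h0 : m - (c :: t).length = 0 := by simp; omega
        rw [hsdef, pvChunkPad, h0]
        simp
      rw [hrhs, ← htail]
      split_ifs with hsmall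
      · simp [List.dropLast_cons_of_ne_nil hc'ne]
      · simp
    · -- single chunk: pad it
      have hle : s.length ≤ m := by omega
      rw [pvPyRange_pos_nil (m:Int) (s.length:Int) (m:Int) hm' (by exact_mod_cast hle)]
      simp only [List.map_nil]
      have htake : s.take m = s := List.take_of_length_le hle
      rw [htake]
      have hget : PySem.List.pyGet? [s] (-1) = some s := by
        rw [pvGetNegOne [s] (by simp)]
        simp
      rw [hget]
      dsimp only
      have hdrop : s.drop m = [] := List.drop_eq_nil_of_le hle
      have hrhs : pvChunkPad m (n+1) s
          = [String.ofList (s ++ List.replicate (m - s.length) 'а')] := by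
        rw [hsdef, pvChunkPad, ← hsdef, htake, hdrop, pvChunkPad]
      rw [hrhs]
      split_ifs with hsmall
      · rw [pvPadFold]
        simp only [List.dropLast, List.nil_append, List.map_cons, List.map_nil]
        rw [PySem.List.length_pyRange_one,
          show ((m:Int) - (s.length:Int) - 0).toNat = m - s.length by omega]
      · have : s.length = m := by omega
        simp [this]

-- pvCleaned is the cleaned text B builds
lemma pvCleaned_def' (text : String) :
    pvCleaned text = (PySem.Chars.lower text.toList).filter (fun c => !pvPunctChars.contains c) := by
  rw [pvCleaned, pvPunctChars]

-- ===== VERDICT (by name: the statement is the Claim_ definition above) =====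
theorem groupingtextby_m_spec : Claim_equal_groupingtextby_m := by
  intro text key _ hpre
  obtain ⟨hkey, hclean⟩ := hpre
  show groupingtextby_m text key = groupingtextby_m_alt text key
  have hkl : 1 ≤ key.toList.length := by
    rcases Nat.eq_zero_or_pos key.toList.length with h | h
    · exact absurd (String.toList_eq_nil_iff.mp (List.eq_nil_of_length_eq_zero h)) hkey
    · exact h
  rw [pvCleaned_def'] at hclean
  have hmain := pvMain key.toList.length hkl
      ((PySem.Chars.lower text.toList).filter (fun c => !pvPunctChars.contains c)).length
      ((PySem.Chars.lower text.toList).filter (fun c => !pvPunctChars.contains c)) hclean le_rfl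
  rw [pvAexpr] at hmain
  simp only [groupingtextby_m, groupingtextby_m_alt, PySem.Str.len, pvCleaned_eq,
    Int.toNat_natCast]
  exact hmain
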